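-- pv_equiv track=rewrite | github.com/wmaxxing/TTP-Sanitizer | extractionFunctions.py | timeExtractor
-- ===== SOURCE A (Python) =====
-- def timeExtractor(timeOfSession: str):
--     #Extracting the number from the incoming string
--     noOne = ""
--     noTwo = ""
--     currIndex = 0
--     for i in range(len(timeOfSession)):
--         if (timeOfSession[i] in tuple("0123456789")):
--             noOne += timeOfSession[i]
--         elif (timeOfSession[i] == "-"):
--             currIndex = i + 1
--             break
--         else:
--             continue
--     for k in range(currIndex, len(timeOfSession)):
--         if (timeOfSession[k] in tuple("0123456789")):
--             noTwo += timeOfSession[k]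
--         else:
--             continue
--     return [int(noOne), int(noTwo)]
-- ===== SOURCE B (Python) =====
-- def timeExtractor(timeOfSession: str):
--     # Single pass: a state machine with a current-part index; digits go to the
--     # buffer of the current part, any '-' switches (and keeps) part 1; if no
--     # dash ever occurred, the second number is the first (A rescans the whole
--     # string in that case, collecting the same digits).
--     bufs = ["", ""]
--     part = 0
--     for ch in timeOfSession:
--         if ch == '-':
--             part = 1
--         elif '0' <= ch <= '9':
--             bufs[part] += ch
--     if part == 0:
--         bufs[1] = bufs[0]
--     return [int(bufs[0]), int(bufs[1])]
-- ===== Notes on version B (the rewrite author's own statement) =====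
-- stated objective: alternative
-- what changed: B is a single-pass state machine: one loop routes each digit to the buffer selected by a current-part index that any dash switches to 1, aliasing the second buffer to the first when no dash occurred, instead of A's two staged index loops with a break and currIndex bookkeeping.
-- outside the precondition, e.g. on timeExtractor(''): A raises ValueError, B raises ValueError; on timeExtractor('ab-3'): A raises ValueError, B raises ValueError; on timeExtractor('12-x'): A raises ValueError, B raises ValueError
import Mathlib
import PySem

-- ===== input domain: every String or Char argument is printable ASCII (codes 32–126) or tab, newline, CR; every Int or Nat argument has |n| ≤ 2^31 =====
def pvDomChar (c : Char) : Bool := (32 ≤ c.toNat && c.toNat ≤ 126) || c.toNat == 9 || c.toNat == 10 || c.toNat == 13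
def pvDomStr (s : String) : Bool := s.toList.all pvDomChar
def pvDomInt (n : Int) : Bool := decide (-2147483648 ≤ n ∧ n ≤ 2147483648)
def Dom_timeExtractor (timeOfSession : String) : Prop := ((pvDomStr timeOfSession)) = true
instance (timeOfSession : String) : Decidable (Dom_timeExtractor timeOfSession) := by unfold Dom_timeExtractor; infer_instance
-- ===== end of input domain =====

-- B is a single-pass state machine (digits routed by a current-part index, second buffer
-- aliased to the first when no dash occurs) instead of A's two staged break/index loops
-- (objective: alternative).

-- A's character test: c in tuple("0123456789")
def pvIsDig (c : Char) : Bool := c ∈ "0123456789".toList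

-- ===== PORT A =====
-- A's first loop: collect digits until a '-' is hit (break); returns the digits and,
-- if a dash was found, the remaining characters after it (second loop's start), else none.
def pvGo1 : List Char → List Char × Option (List Char)
  | [] => ([], none)
  | c :: rest =>
    if pvIsDig c then
      let p := pvGo1 rest
      (c :: p.1, p.2)
    else if c = '-' then ([], some rest)
    else pvGo1 rest

def timeExtractor (timeOfSession : String) : List Int :=
  let cs := timeOfSession.toList
  let p := pvGo1 cs
  let tail := p.2.getD cs           -- currIndex = 0 when no dash: second loop scans the whole string
  let noTwo := tail.foldl (fun acc c => if pvIsDig c then acc ++ [c] else acc) []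
  [(PySem.Int.ofChars? p.1).getD 0, (PySem.Int.ofChars? noTwo).getD 0]
  -- int("") raises ValueError in Python; those inputs are excluded by Pre_ below

-- ===== PORT B =====
-- the loop body of B: on '-' switch (and keep) part 1, on a digit append it to the
-- current part's buffer, otherwise leave the state alone
def pvStep (st : (List Char × List Char) × Nat) (ch : Char) : (List Char × List Char) × Nat :=
  if ch = '-' then (st.1, 1)
  else if '0' ≤ ch ∧ ch ≤ '9' then
    (if st.2 = 0 then (st.1.1 ++ [ch], st.1.2) else (st.1.1, st.1.2 ++ [ch]), st.2)
  else st

def timeExtractor_alt (timeOfSession : String) : List Int :=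
  let st := timeOfSession.toList.foldl pvStep (([], []), 0)
  let bufTwo := if st.2 = 0 then st.1.1 else st.1.2   -- bufs[1] = bufs[0] when no dash was seen
  [(PySem.Int.ofChars? st.1.1).getD 0, (PySem.Int.ofChars? bufTwo).getD 0]

-- ===== PRECONDITION & SPEC =====
-- Pre_ excludes exactly the inputs on which A raises ValueError (int("") when a half carries no
-- digit); B raises there too.
def Pre_timeExtractor (timeOfSession : String) : Prop :=
  let cs := timeOfSession.toList
  (cs.takeWhile (· != '-')).any pvIsDig = true ∧
  (if '-' ∈ cs then ((cs.dropWhile (· != '-')).tail).any pvIsDig = true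
   else cs.any pvIsDig = true)
instance (timeOfSession : String) : Decidable (Pre_timeExtractor timeOfSession) := by
  unfold Pre_timeExtractor; infer_instance

def pvWitness_timeExtractor : String := "12-34"

def Spec_timeExtractor (timeOfSession : String) (out : List Int) : Prop := out = timeExtractor_alt timeOfSession
instance (timeOfSession : String) (out : List Int) : Decidable (Spec_timeExtractor timeOfSession out) := by unfold Spec_timeExtractor; infer_instance

-- ===== CLAIM (what is proved, stated in full; the proofs are below) =====
def Claim_equal_timeExtractor : Prop := ∀ (timeOfSession : String), Dom_timeExtractor timeOfSession → Pre_timeExtractor timeOfSession → Spec_timeExtractor timeOfSession (timeExtractor timeOfSession)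

-- ===== LEMMAS AND PROOFS =====

-- B's digit test ('0' <= ch <= '9') agrees with A's membership test
theorem pvDig_iff (c : Char) : ('0' ≤ c ∧ c ≤ '9') ↔ pvIsDig c = true := by
  have hbound : ('0' ≤ c ∧ c ≤ '9') ↔ 48 ≤ c.toNat ∧ c.toNat ≤ 57 := by
    rw [Char.le_def, Char.le_def, UInt32.le_iff_toNat_le, UInt32.le_iff_toNat_le]
    exact Iff.rfl
  rw [hbound]
  constructor
  · rintro ⟨h1, h2⟩
    have hof := Char.ofNat_toNat c
    have : c.toNat = 48 ∨ c.toNat = 49 ∨ c.toNat = 50 ∨ c.toNat = 51 ∨ c.toNat = 52 ∨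
        c.toNat = 53 ∨ c.toNat = 54 ∨ c.toNat = 55 ∨ c.toNat = 56 ∨ c.toNat = 57 := by omega
    rcases this with h|h|h|h|h|h|h|h|h|h <;> (rw [h] at hof; rw [← hof]; decide)
  · intro h
    simp [pvIsDig] at h
    rcases h with rfl|rfl|rfl|rfl|rfl|rfl|rfl|rfl|rfl|rfl <;> decide

-- A's break-loop in closed form
theorem pvGo1_eq (cs : List Char) :
    pvGo1 cs = (List.filter pvIsDig (cs.takeWhile (· != '-')),
                if '-' ∈ cs then some ((cs.dropWhile (· != '-')).tail) else none) := by
  induction cs with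
  | nil => simp [pvGo1]
  | cons c rest ih =>
    by_cases hd : pvIsDig c
    · have hne : c ≠ '-' := by rintro rfl; exact absurd hd (by decide)
      simp [pvGo1, hd, ih, hne, Ne.symm hne]
    · by_cases hc : c = '-'
      · subst hc
        simp [pvGo1, show pvIsDig '-' = false from by decide]
      · simp [pvGo1, hd, hc, ih, Ne.symm hc]

-- one step of B's loop, evaluated on each kind of character
theorem pvStep_dash (st : (List Char × List Char) × Nat) : pvStep st '-' = (st.1, 1) := by
  simp [pvStep]

theorem pvStep_dig0 (a b : List Char) (c : Char) (h : pvIsDig c = true) :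
    pvStep ((a, b), 0) c = ((a ++ [c], b), 0) := by
  have hc : c ≠ '-' := by rintro rfl; exact absurd h (by decide)
  simp [pvStep, hc, (pvDig_iff c).mpr h]

theorem pvStep_dig1 (a b : List Char) (c : Char) (h : pvIsDig c = true) :
    pvStep ((a, b), 1) c = ((a, b ++ [c]), 1) := by
  have hc : c ≠ '-' := by rintro rfl; exact absurd h (by decide)
  simp [pvStep, hc, (pvDig_iff c).mpr h]

theorem pvStep_other (st : (List Char × List Char) × Nat) (c : Char)
    (hc : c ≠ '-') (hd : pvIsDig c = false) : pvStep st c = st := by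
  have : ¬ ('0' ≤ c ∧ c ≤ '9') := fun hx => by
    have := (pvDig_iff c).mp hx; rw [hd] at this; exact Bool.false_ne_true this
  simp [pvStep, hc, this]

-- after the dash, B appends exactly the digits to the second buffer
theorem pvStep_state1 (l : List Char) (a b : List Char) :
    l.foldl pvStep ((a, b), 1) = ((a, b ++ l.filter pvIsDig), 1) := by
  induction l generalizing b with
  | nil => simp
  | cons c rest ih =>
    rw [List.foldl_cons]
    by_cases hc : c = '-'
    · subst hc
      rw [pvStep_dash, ih]
      simp [show pvIsDig '-' = false from by decide]
    · by_cases hd : pvIsDig c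
      · rw [pvStep_dig1 _ _ _ hd, ih]
        simp [hd]
      · rw [pvStep_other _ _ hc (by simpa using hd), ih]
        simp [hd]

-- before any dash, B appends exactly the digits to the first buffer
theorem pvStep_state0 (l : List Char) (a b : List Char) (h : '-' ∉ l) :
    l.foldl pvStep ((a, b), 0) = ((a ++ l.filter pvIsDig, b), 0) := by
  induction l generalizing a with
  | nil => simp
  | cons c rest ih =>
    have hc : c ≠ '-' := fun hEq => h (hEq ▸ List.mem_cons_self)
    have hrest : '-' ∉ rest := fun hm => h (List.mem_cons_of_mem _ hm)
    rw [List.foldl_cons]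
    by_cases hd : pvIsDig c
    · rw [pvStep_dig0 _ _ _ hd, ih _ hrest]
      simp [hd]
    · rw [pvStep_other _ _ hc (by simpa using hd), ih _ hrest]
      simp [hd]

-- splitting a dash-containing list at its first dash
theorem pvSplit (cs : List Char) (h : '-' ∈ cs) :
    cs = cs.takeWhile (· != '-') ++ '-' :: (cs.dropWhile (· != '-')).tail := by
  have hdw : cs.dropWhile (· != '-') ≠ [] := by
    intro hnil
    have := List.mem_append.mp ((List.takeWhile_append_dropWhile (p := (· != '-')) (l := cs)) ▸ h)
    rcases this with hm | hm
    · have := List.mem_takeWhile_imp hm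
      simp at this
    · rw [hnil] at hm; simp at hm
  obtain ⟨x, t, hxt⟩ := List.exists_cons_of_ne_nil hdw
  have hx : x = '-' := by
    have := List.head_dropWhile_not (p := (· != '-')) (l := cs) hdw
    simp only [hxt] at this
    simpa using this
  conv_lhs => rw [← List.takeWhile_append_dropWhile (p := (· != '-')) (l := cs)]
  rw [hxt, hx]
  simp

theorem pvDash_notin_takeWhile (cs : List Char) : '-' ∉ cs.takeWhile (· != '-') := by
  intro hm
  have := List.mem_takeWhile_imp hm
  simp at this

-- ===== VERDICT (by name: the statement is the Claim_ definition above) =====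
theorem timeExtractor_spec : Claim_equal_timeExtractor := by
  intro s _ _
  unfold Spec_timeExtractor timeExtractor timeExtractor_alt
  simp only [pvGo1_eq, PySem.List.foldl_append_if_eq_filter, List.nil_append]
  set cs := s.toList with hcs
  by_cases hmem : '-' ∈ cs
  · have hfold : cs.foldl pvStep (([], []), 0)
        = ((List.filter pvIsDig (cs.takeWhile (· != '-')),
            List.filter pvIsDig ((cs.dropWhile (· != '-')).tail)), 1) := by
      conv_lhs => rw [pvSplit cs hmem]
      rw [List.foldl_append, pvStep_state0 _ _ _ (pvDash_notin_takeWhile cs),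
          List.foldl_cons, pvStep_dash, pvStep_state1]
      simp
    simp [hmem, hfold]
  · have htw : cs.takeWhile (· != '-') = cs := by
      rw [List.takeWhile_eq_self_iff]
      intro c hc
      simp
      rintro rfl; exact hmem hc
    have hfold : cs.foldl pvStep (([], []), 0) = ((List.filter pvIsDig cs, []), 0) := by
      rw [pvStep_state0 _ _ _ hmem]; simp
    simp [hmem, htw, hfold]
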